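-- pv_equiv track=rewrite | github.com/f4t4nt/Berkeley-Crossword-Solver | probability.py | get_cuts
-- ===== SOURCE A (Python) =====
-- def get_cuts(base, cnt):
--     if cnt == 1:
--         return [[base]]
--     else:
--         cuts = []
--         for i in range(len(base) - cnt + 1):
--             for p in get_cuts(base[i + 1:], cnt - 1):
--                 cuts.append([base[:i + 1]] + p)
--         return cuts
-- ===== SOURCE B (Python) =====
-- def get_cuts(base, cnt):
--     # Bottom-up DP over suffixes instead of naive recursion:
--     # ways[j] = all ways to split base[j:] into k pieces, for k = 1..cnt.
--     n = len(base)
--     if cnt > max(n, 1):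
--         return []  # more pieces than elements: no split exists (cnt == 1 allows the empty piece)
--     ways = [[[base[j:]]] for j in range(n + 1)]  # k == 1
--     for k in range(2, cnt + 1):
--         ways = [[[base[j:i + 1]] + p
--                  for i in range(j, n - k + 1)
--                  for p in ways[i + 1]]
--                 for j in range(n + 1)]
--     return ways[0]
-- ===== Notes on version B (the rewrite author's own statement) =====
-- stated objective: alternative
-- what changed: Replaces A's naive top-down recursion (which re-solves the same suffix/count subproblems along every prefix path) with an iterative bottom-up dynamic program: a table ways[j] of all splits of base[j:] into k pieces, rebuilt for k = 2..cnt, returning ways[0].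
-- outside the precondition, e.g. on get_cuts([1, 2], 0): A raises RecursionError, B returns [[[1, 2]]]
import Mathlib
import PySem

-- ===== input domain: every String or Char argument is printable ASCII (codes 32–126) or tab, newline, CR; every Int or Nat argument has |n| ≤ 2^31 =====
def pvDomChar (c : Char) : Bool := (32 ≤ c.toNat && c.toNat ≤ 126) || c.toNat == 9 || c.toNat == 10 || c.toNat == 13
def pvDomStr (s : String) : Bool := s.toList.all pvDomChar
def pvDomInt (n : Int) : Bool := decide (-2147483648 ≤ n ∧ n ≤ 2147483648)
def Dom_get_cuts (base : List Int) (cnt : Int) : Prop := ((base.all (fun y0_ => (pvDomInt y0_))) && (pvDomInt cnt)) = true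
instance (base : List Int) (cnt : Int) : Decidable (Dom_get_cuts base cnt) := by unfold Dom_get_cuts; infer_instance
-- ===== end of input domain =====

-- B replaces A's naive recursion by a bottom-up dynamic program over suffixes (objective: alternative).

-- ===== PORT A =====
-- A recurses with cnt decreasing by 1; for cnt ≥ 1 the fuel cnt.toNat is exact
-- (cnt ≤ 0, where Python A recurses forever, is outside Pre_ and returns []).
def get_cutsFuel (base : List Int) : Nat → List (List (List Int))
  | 0 => []
  | 1 => [[base]]
  | m + 2 =>
      (PySem.List.pyRange 0 ((base.length : Int) - ((m : Int) + 2) + 1) 1).foldl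
        (fun cuts i =>
          (get_cutsFuel (PySem.List.slice base (some (i + 1)) none) (m + 1)).foldl
            (fun cuts p => cuts ++ [PySem.List.slice base none (some (i + 1)) :: p]) cuts)
        []

def get_cuts (base : List Int) (cnt : Int) : List (List (List Int)) :=
  if cnt ≤ 0 then [] else get_cutsFuel base cnt.toNat

-- ===== PORT B =====
-- Python list indexing ways[i+1] / ways[0] is always in range; pyGetD with default [] totalises it.
def get_cuts_alt (base : List Int) (cnt : Int) : List (List (List Int)) :=
  let n : Int := base.length
  if cnt > max n 1 then [] else
  let ways0 := (PySem.List.pyRange 0 (n + 1) 1).map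
    (fun j => [[PySem.List.slice base (some j) none]])
  let ways := (PySem.List.pyRange 2 (cnt + 1) 1).foldl
    (fun ways k =>
      (PySem.List.pyRange 0 (n + 1) 1).map (fun j =>
        (PySem.List.pyRange j (n - k + 1) 1).flatMap (fun i =>
          (PySem.List.pyGetD ways (i + 1) []).map
            (fun p => PySem.List.slice base (some j) (some (i + 1)) :: p))))
    ways0
  PySem.List.pyGetD ways 0 []

-- ===== PRECONDITION & SPEC =====
-- Pre_ excludes cnt ≤ 0, on which Python A recurses without bound (RecursionError).
def Pre_get_cuts (base : List Int) (cnt : Int) : Prop := 1 ≤ cnt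
instance (base : List Int) (cnt : Int) : Decidable (Pre_get_cuts base cnt) := by
  unfold Pre_get_cuts; infer_instance

def pvWitness_get_cuts : List Int × Int := ([1, 2, 3], 2)

def Spec_get_cuts (base : List Int) (cnt : Int) (out : List (List (List Int))) : Prop := out = get_cuts_alt base cnt
instance (base : List Int) (cnt : Int) (out : List (List (List Int))) : Decidable (Spec_get_cuts base cnt out) := by unfold Spec_get_cuts; infer_instance

-- ===== CLAIM (what is proved, stated in full; the proofs are below) =====
def Claim_equal_get_cuts : Prop := ∀ (base : List Int) (cnt : Int), Dom_get_cuts base cnt → Pre_get_cuts base cnt → Spec_get_cuts base cnt (get_cuts base cnt)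

-- ===== LEMMAS AND PROOFS =====

-- the loop body of B's port, and the table it maintains
def pvStep (base : List Int) (ways : List (List (List (List Int)))) (k : Int) : List (List (List (List Int))) :=
  (PySem.List.pyRange 0 ((base.length : Int) + 1) 1).map (fun j =>
    (PySem.List.pyRange j ((base.length : Int) - k + 1) 1).flatMap (fun i =>
      (PySem.List.pyGetD ways (i + 1) []).map
        (fun p => PySem.List.slice base (some j) (some (i + 1)) :: p)))

def pvW (base : List Int) (K : Nat) : List (List (List (List Int))) :=
  (PySem.List.pyRange 0 ((base.length : Int) + 1) 1).map
    (fun j => get_cutsFuel (base.drop j.toNat) (K + 1))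

lemma pv_flatMap_congr {α β : Type} (l : List α) (f g : α → List β)
    (h : ∀ x ∈ l, f x = g x) : l.flatMap f = l.flatMap g := by
  induction l with
  | nil => rfl
  | cons a t ih =>
      simp only [List.flatMap_cons]
      rw [h a (by simp), ih (fun x hx => h x (by simp [hx]))]

lemma fuel_flatMap (base : List Int) (m : Nat) :
    get_cutsFuel base (m + 2) =
      (PySem.List.pyRange 0 ((base.length : Int) - ((m : Int) + 2) + 1) 1).flatMap
        (fun i => (get_cutsFuel (PySem.List.slice base (some (i + 1)) none) (m + 1)).map
          (fun p => PySem.List.slice base none (some (i + 1)) :: p)) := by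
  show (PySem.List.pyRange 0 ((base.length : Int) - ((m : Int) + 2) + 1) 1).foldl _ [] = _
  simp only [PySem.List.foldl_append_singleton_eq_map]
  rw [PySem.List.foldl_append_eq_flatMap]
  simp

lemma pv_fuel_nil (base : List Int) (m : Nat) (h : (base.length : Int) < (m : Int) + 2) :
    get_cutsFuel base (m + 2) = [] := by
  rw [fuel_flatMap, PySem.List.pyRange_one_eq_nil (by omega)]
  rfl

lemma pv_suffix (base : List Int) (K : Nat) (j : Int) (hj : 0 ≤ j) (hjn : j ≤ (base.length : Int)) :
    (PySem.List.pyRange j ((base.length : Int) - ((K : Int) + 2) + 1) 1).flatMap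
      (fun i => (get_cutsFuel (base.drop (i + 1).toNat) (K + 1)).map
        (fun p => PySem.List.slice base (some j) (some (i + 1)) :: p))
    = get_cutsFuel (base.drop j.toNat) (K + 2) := by
  rw [fuel_flatMap]
  have hlen : ((base.drop j.toNat).length : Int) = (base.length : Int) - j := by
    simp [List.length_drop]
    omega
  rw [hlen]
  rw [PySem.List.pyRange_one, PySem.List.pyRange_one]
  have hN : (((base.length : Int) - ((K : Int) + 2) + 1) - j).toNat
      = ((((base.length : Int) - j) - ((K : Int) + 2) + 1) - 0).toNat := by omega
  rw [hN, List.flatMap_map, List.flatMap_map]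
  congr 1
  funext k
  simp only [zero_add]
  have h1 : PySem.List.slice (base.drop j.toNat) (some ((k : Int) + 1)) none
      = base.drop ((j + (k : Int) + 1).toNat) := by
    rw [PySem.List.slice_from _ (by omega)]
    rw [List.drop_drop]
    congr 1
    omega
  have h2 : PySem.List.slice base (some j) (some (j + (k : Int) + 1))
      = (base.drop j.toNat).take (k + 1) := by
    rw [PySem.List.slice_toNat _ hj (by omega)]
    congr 1
    omega
  have h3 : PySem.List.slice (base.drop j.toNat) none (some ((k : Int) + 1))
      = (base.drop j.toNat).take (k + 1) := by
    rw [PySem.List.slice_to _ (by omega)]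
    congr 1
  simp only [h1, h2, h3]

lemma pv_step_W (base : List Int) (K : Nat) :
    pvStep base (pvW base K) ((K : Int) + 2) = pvW base (K + 1) := by
  unfold pvStep pvW
  apply List.map_congr_left
  intro j hj
  rw [PySem.List.mem_pyRange_one] at hj
  rw [pv_flatMap_congr _ _
    (fun i => (get_cutsFuel (base.drop (i + 1).toNat) (K + 1)).map
      (fun p => PySem.List.slice base (some j) (some (i + 1)) :: p))
    ?_]
  · exact pv_suffix base K j hj.1 (by omega)
  · intro i hi
    rw [PySem.List.mem_pyRange_one] at hi
    rw [PySem.List.pyGetD_map_pyRange_of_nonneg _ _ _ _ (by omega) (by omega)]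

lemma pv_inv (base : List Int) (K : Nat) :
    (PySem.List.pyRange 2 ((K : Int) + 2) 1).foldl (pvStep base)
      ((PySem.List.pyRange 0 ((base.length : Int) + 1) 1).map
        (fun j => [[PySem.List.slice base (some j) none]]))
    = pvW base K := by
  induction K with
  | zero =>
      rw [show ((0 : Nat) : Int) + 2 = 2 by norm_num, PySem.List.pyRange_one_eq_nil (le_refl 2)]
      simp only [List.foldl_nil]
      unfold pvW
      apply List.map_congr_left
      intro j hj
      rw [PySem.List.mem_pyRange_one] at hj
      rw [PySem.List.slice_from _ hj.1]
      simp [get_cutsFuel]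
  | succ K ih =>
      have hc : ((K + 1 : Nat) : Int) + 2 = ((K : Int) + 2) + 1 := by push_cast; ring
      rw [hc, PySem.List.pyRange_one_succ_right (a := 2) (b := (K : Int) + 2) (by omega), List.foldl_append]
      rw [ih]
      simp only [List.foldl_cons, List.foldl_nil]
      exact pv_step_W base K

-- ===== VERDICT (by name: the statement is the Claim_ definition above) =====
theorem get_cuts_spec : Claim_equal_get_cuts := by
  intro base cnt _ hpre
  unfold Pre_get_cuts at hpre
  unfold Spec_get_cuts get_cuts
  simp only [get_cuts_alt]
  rw [if_neg (by omega)]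
  by_cases hbig : cnt > max ((base.length : Int)) 1
  · rw [if_pos hbig]
    have h2 : cnt.toNat = (cnt.toNat - 2) + 2 := by omega
    rw [h2]
    exact pv_fuel_nil base _ (by omega)
  rw [if_neg hbig]
  have hstep : (fun (ways : List (List (List (List Int)))) (k : Int) =>
      (PySem.List.pyRange 0 ((base.length : Int) + 1) 1).map (fun j =>
        (PySem.List.pyRange j ((base.length : Int) - k + 1) 1).flatMap (fun i =>
          (PySem.List.pyGetD ways (i + 1) []).map
            (fun p => PySem.List.slice base (some j) (some (i + 1)) :: p)))) = pvStep base := rfl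
  rw [hstep]
  have hK : cnt + 1 = ((cnt.toNat - 1 : Nat) : Int) + 2 := by omega
  rw [hK, pv_inv]
  unfold pvW
  rw [PySem.List.pyGetD_map_pyRange_of_nonneg _ _ _ _ (by omega) (by omega)]
  simp only [Int.toNat_zero, List.drop_zero]
  congr 1
  omega
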